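-- pv_equiv track=rewrite | github.com/naayoung/Algorithm | 프로그래머스/0/181931. 등차수열의 특정한 항만 더하기/등차수열의 특정한 항만 더하기.py | solution
-- ===== SOURCE A (Python) =====
-- def solution(a, d, included):
--     answer = 0
--     temp = a
--     for i in range(len(included)):
--         if included[i]:
--             answer += temp
--         temp += d
--
--     return answer
-- ===== SOURCE B (Python) =====
-- def solution(a, d, included):
--     # Aggregate decomposition: since terms are exact ints,
--     # sum over flagged i of (a + i*d) = a*(#flagged) + d*(sum of flagged indices).
--     # Compute the two aggregates (count and index-sum), no per-term values at all.
--     idx = [i for i, inc in enumerate(included) if inc]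
--     return a * len(idx) + d * sum(idx)
-- ===== Notes on version B (the rewrite author's own statement) =====
-- stated objective: alternative
-- what changed: Instead of accumulating term values (temp += d) and adding flagged terms, B collects the flagged index positions and returns the algebraic aggregate a*count + d*(sum of those indices), never computing any sequence term.
import Mathlib
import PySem

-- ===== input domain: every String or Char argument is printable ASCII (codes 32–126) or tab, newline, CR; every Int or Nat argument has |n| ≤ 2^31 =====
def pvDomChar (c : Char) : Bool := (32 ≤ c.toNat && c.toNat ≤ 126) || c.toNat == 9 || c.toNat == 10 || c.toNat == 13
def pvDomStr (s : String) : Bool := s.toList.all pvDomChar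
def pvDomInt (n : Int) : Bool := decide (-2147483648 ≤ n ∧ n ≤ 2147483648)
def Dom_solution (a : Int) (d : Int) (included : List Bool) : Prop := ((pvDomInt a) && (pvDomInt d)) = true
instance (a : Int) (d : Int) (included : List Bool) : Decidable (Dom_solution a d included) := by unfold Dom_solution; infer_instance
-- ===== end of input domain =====

-- ===== PORT A =====
-- B replaces A's running accumulator over term values with the aggregate a*count + d*(sum of flagged indices) (objective: alternative).
def solution (a : Int) (d : Int) (included : List Bool) : Int :=
  (included.foldl
    (fun (st : Int × Int) inc =>
      ((if inc then st.1 + st.2 else st.1), st.2 + d))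
    (0, a)).1

-- ===== PORT B =====
def solution_alt (a : Int) (d : Int) (included : List Bool) : Int :=
  let idx := ((PySem.List.enumerate included 0).filter (fun p => p.2)).map (fun p => p.1)
  a * idx.length + d * idx.sum

-- ===== PRECONDITION & SPEC =====
def Spec_solution (a : Int) (d : Int) (included : List Bool) (out : Int) : Prop := out = solution_alt a d included
instance (a : Int) (d : Int) (included : List Bool) (out : Int) : Decidable (Spec_solution a d included out) := by unfold Spec_solution; infer_instance

-- ===== CLAIM (what is proved, stated in full; the proofs are below) =====
def Claim_equal_solution : Prop := ∀ (a : Int) (d : Int) (included : List Bool), Dom_solution a d included → Spec_solution a d included (solution a d included)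

-- ===== LEMMAS AND PROOFS =====
lemma solution_key (l : List Bool) : ∀ (s ans a d : Int),
    (l.foldl
      (fun (st : Int × Int) inc =>
        ((if inc then st.1 + st.2 else st.1), st.2 + d))
      (ans, a + s * d)).1
    = ans + a * (((PySem.List.enumerate l s).filter (fun p => p.2)).map (fun p => p.1)).length
        + d * (((PySem.List.enumerate l s).filter (fun p => p.2)).map (fun p => p.1)).sum := by
  induction l with
  | nil => intro s ans a d; simp [PySem.List.enumerate_nil]
  | cons b t ih =>
    intro s ans a d
    have h1 : a + s * d + d = a + (s + 1) * d := by ring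
    simp only [List.foldl_cons, PySem.List.enumerate_cons, List.filter_cons]
    cases b with
    | false =>
      simpa [h1] using ih (s + 1) ans a d
    | true =>
      have := ih (s + 1) (ans + (a + s * d)) a d
      simp only [h1] at this ⊢
      simp only [if_pos, List.map_cons, List.length_cons, List.sum_cons, this]
      push_cast
      ring

-- ===== VERDICT (by name: the statement is the Claim_ definition above) =====
theorem solution_spec : Claim_equal_solution := by
  intro a d included _
  unfold Spec_solution solution solution_alt
  have := solution_key included 0 0 a d
  simpa using this
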